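-- pv_equiv track=rewrite | github.com/Prajjwal98Dubey/DSA-Algorithms | cses/searching and sorting/collectinnumbers.py | solve
-- ===== SOURCE A (Python) =====
-- def solve(nums):
--     hash = set()
--     rounds = 0
--     for n in nums:
--         if n-1 not in hash:
--             rounds+=1
--         hash.add(n)
--     return rounds
-- ===== SOURCE B (Python) =====
-- def solve(nums):
--     first_occ = {}
--     for i, v in enumerate(nums):
--         if v not in first_occ:
--             first_occ[v] = i
--     sentinel = len(nums) + 1
--     rounds = 0
--     for i, v in enumerate(nums):
--         if first_occ.get(v - 1, sentinel) >= i: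
--             rounds += 1
--     return rounds
-- ===== Notes on version B (the rewrite author's own statement) =====
-- stated objective: alternative
-- what changed: Replaces the online accumulating-set scan (membership test against values seen so far) with a first-occurrence index table built in one pass plus a second counting pass that compares the predecessor's first-occurrence position against the current index.
import Mathlib
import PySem

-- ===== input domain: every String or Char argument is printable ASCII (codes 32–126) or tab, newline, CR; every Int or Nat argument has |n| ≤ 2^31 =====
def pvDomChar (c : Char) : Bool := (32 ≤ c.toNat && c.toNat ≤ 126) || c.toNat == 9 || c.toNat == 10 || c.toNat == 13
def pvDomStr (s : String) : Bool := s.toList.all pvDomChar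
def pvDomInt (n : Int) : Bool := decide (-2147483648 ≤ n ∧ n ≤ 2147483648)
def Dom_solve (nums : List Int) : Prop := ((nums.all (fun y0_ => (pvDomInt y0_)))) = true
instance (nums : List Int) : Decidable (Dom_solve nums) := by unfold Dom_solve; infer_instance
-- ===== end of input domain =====

-- B replaces the online accumulating-set scan with a first-occurrence index table
-- plus a position-comparing counting pass (alternative decomposition, same cost).


-- ===== PORT A =====
def solve (nums : List Int) : Int :=
  (nums.foldl
    (fun (st : PySem.Set Int × Int) n =>
      (PySem.Set.add st.1 n,
       if PySem.Set.contains st.1 (n - 1) then st.2 else st.2 + 1))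
    (PySem.Set.empty, 0)).2

-- ===== PORT B =====
def solve_alt (nums : List Int) : Int :=
  let first_occ : PySem.Dict Int Int :=
    (PySem.List.enumerate nums 0).foldl
      (fun d p => if d.contains p.2 then d else d.insert p.2 p.1) PySem.Dict.empty
  let sentinel : Int := (nums.length : Int) + 1
  (PySem.List.enumerate nums 0).foldl
    (fun r p => if first_occ.getD (p.2 - 1) sentinel ≥ p.1 then r + 1 else r) 0

-- ===== PRECONDITION & SPEC =====
def Spec_solve (nums : List Int) (out : Int) : Prop := out = solve_alt nums
instance (nums : List Int) (out : Int) : Decidable (Spec_solve nums out) := by unfold Spec_solve; infer_instance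

-- ===== CLAIM (what is proved, stated in full; the proofs are below) =====
def Claim_equal_solve : Prop := ∀ (nums : List Int), Dom_solve nums → Spec_solve nums (solve nums)

-- ===== LEMMAS AND PROOFS =====

-- common specification: rounds contributed by `rest` when `seen` is the already-processed prefix
def cnt (seen rest : List Int) : Int :=
  match rest with
  | [] => 0
  | n :: rest' => (if n - 1 ∈ seen then 0 else 1) + cnt (seen ++ [n]) rest'

-- A-side: the set/counter fold computes cnt
lemma aSide (rest seen : List Int) (s : PySem.Set Int) (r : Int)
    (hs : ∀ x : Int, x ∈ s ↔ x ∈ seen) :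
    (rest.foldl
      (fun (st : PySem.Set Int × Int) n =>
        (PySem.Set.add st.1 n,
         if PySem.Set.contains st.1 (n - 1) then st.2 else st.2 + 1))
      (s, r)).2 = r + cnt seen rest := by
  induction rest generalizing seen s r with
  | nil => simp [cnt]
  | cons n rest' ih =>
    have hs' : ∀ x : Int, x ∈ PySem.Set.add s n ↔ x ∈ seen ++ [n] := by
      intro x
      rw [PySem.Set.mem_add, List.mem_append, hs]
      simp
    have hc : PySem.Set.contains s (n - 1) = true ↔ (n - 1) ∈ seen := by
      rw [PySem.Set.contains_iff, hs]
    simp only [List.foldl_cons, cnt]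
    rw [ih (seen ++ [n]) (PySem.Set.add s n) _ hs']
    by_cases h : n - 1 ∈ seen
    · rw [if_pos (hc.mpr h), if_pos h]; ring
    · rw [if_neg (fun hh => h (hc.mp hh)), if_neg h]; ring

-- the first_occ fold computes find? of the pair list (insert-if-absent keeps the first binding)
lemma foldl_firstBind (l : List (Int × Int)) (d : PySem.Dict Int Int) (v : Int) :
    (l.foldl (fun d p => if d.contains p.2 then d else d.insert p.2 p.1) d).get? v =
      if d.contains v then d.get? v
      else (l.find? (fun p => p.2 == v)).map (·.1) := by
  induction l generalizing d with
  | nil =>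
    by_cases h : d.contains v = true
    · simp [h]
    · rw [List.foldl_nil, List.find?_nil, if_neg h, Option.map_none,
        (PySem.Dict.get?_eq_none_iff_not_mem_keys d v).mpr
          (fun hm => h ((PySem.Dict.contains_iff_mem_keys d v).mpr hm))]
  | cons p l ih =>
    simp only [List.foldl_cons]
    by_cases hc : d.contains p.2 = true
    · rw [if_pos hc, ih]
      by_cases hv : d.contains v = true
      · rw [if_pos hv, if_pos hv]
      · have hne : ¬ ((fun p : Int × Int => p.2 == v) p) = true := by
          intro hh; exact hv (by rwa [eq_of_beq hh] at hc)
        rw [if_neg hv, if_neg hv, List.find?_cons_of_neg (p := fun q : Int × Int => q.2 == v) hne]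
    · rw [if_neg hc, ih]
      by_cases hv : v = p.2
      · subst hv
        rw [if_pos (by rw [PySem.Dict.contains_insert]; simp),
          PySem.Dict.get?_insert_self, if_neg (by simpa using hc),
          List.find?_cons_of_pos (p := fun q : Int × Int => q.2 == p.2) (by simp)]
        simp
      · have hb : (v == p.2) = false := by simp [hv]
        have hne : ¬ ((fun p : Int × Int => p.2 == v) p) = true := by
          simp only [beq_iff_eq]
          exact fun hh => hv hh.symm
        rw [PySem.Dict.contains_insert, hb, Bool.false_or,
          PySem.Dict.get?_insert, if_neg hv, List.find?_cons_of_neg (p := fun q : Int × Int => q.2 == v) hne]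

-- find? over enumerate is idxOf?
lemma find?_enumerate (xs : List Int) (s : Int) (w : Int) :
    ((PySem.List.enumerate xs s).find? (fun p => p.2 == w)) =
      (xs.idxOf? w).map (fun j : Nat => (s + (j : Int), w)) := by
  induction xs generalizing s with
  | nil => simp [PySem.List.enumerate_nil]
  | cons x xs ih =>
    rw [PySem.List.enumerate_cons, List.idxOf?_cons]
    by_cases h : x = w
    · subst h
      rw [List.find?_cons_of_pos (p := fun q : Int × Int => q.2 == x) (by simp)]
      simp
    · have hne : ¬ ((fun p : Int × Int => p.2 == w) (s, x)) = true := by simp [h]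
      rw [List.find?_cons_of_neg (p := fun q : Int × Int => q.2 == w) hne, ih (s + 1)]
      have hb : (x == w) = false := by simp [h]
      rw [hb]
      simp only [Bool.false_eq_true, if_false, Option.map_map]
      cases hxo : xs.idxOf? w with
      | none => simp
      | some j =>
        simp only [Option.map_some, Function.comp_apply]
        congr 1
        push_cast
        ring_nf

-- membership in a prefix vs idxOf?
lemma mem_take_iff_idxOf? (xs : List Int) (i : Nat) (w : Int) :
    w ∈ xs.take i ↔ ∃ j, xs.idxOf? w = some j ∧ j < i := by
  induction xs generalizing i with
  | nil => simp
  | cons x xs ih =>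
    cases i with
    | zero => simp
    | succ i =>
      rw [List.take_succ_cons, List.mem_cons, List.idxOf?_cons]
      by_cases h : x = w
      · subst h
        simp
      · have hb : (x == w) = false := by simp [h]
        rw [hb]
        simp only [Bool.false_eq_true, if_false]
        constructor
        · intro hm
          rcases hm with hm | hm
          · exact absurd hm.symm h
          · rcases (ih i).mp hm with ⟨j, hj, hji⟩
            exact ⟨j + 1, by simp [hj], by omega⟩
        · rintro ⟨j, hj, hji⟩
          rcases Option.map_eq_some_iff.mp hj with ⟨j', hj', rfl⟩
          exact Or.inr ((ih i).mpr ⟨j', hj', by omega⟩)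

-- the B condition at index i decides predecessor-not-in-prefix
lemma cond_iff (xs : List Int) (w : Int) (i : Nat) (hi : i < xs.length) :
    (((PySem.List.enumerate xs 0).foldl
        (fun d p => if d.contains p.2 then d else d.insert p.2 p.1)
        PySem.Dict.empty).getD w ((xs.length : Int) + 1) ≥ (i : Int))
      ↔ w ∉ xs.take i := by
  rw [PySem.Dict.getD_eq_get?_getD, foldl_firstBind, find?_enumerate,
    if_neg (by simp : ¬ (PySem.Dict.empty : PySem.Dict Int Int).contains w = true),
    mem_take_iff_idxOf?]
  cases hxo : xs.idxOf? w with
  | none =>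
    simp only [Option.map_none, Option.getD_none, ge_iff_le]
    constructor
    · rintro _ ⟨j, hj, _⟩; cases hj
    · intro _; omega
  | some j =>
    obtain ⟨hj, -⟩ := List.idxOf?_eq_some_iff.mp hxo
    simp only [Option.map_some, Option.getD_some, ge_iff_le, zero_add]
    constructor
    · rintro hle ⟨k, hk, hki⟩
      cases hk
      omega
    · intro h
      by_contra hlt
      exact h ⟨j, rfl, by omega⟩

-- B-side: the counting fold over the enumerate suffix computes cnt of the corresponding split
lemma bSide (xs : List Int) (rest : List Int) (k : Nat) (r : Int)
    (h : rest = xs.drop k) (hk : k ≤ xs.length) :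
    (PySem.List.enumerate rest (k : Int)).foldl
        (fun r p => if ((PySem.List.enumerate xs 0).foldl
            (fun d p => if d.contains p.2 then d else d.insert p.2 p.1)
            PySem.Dict.empty).getD (p.2 - 1) ((xs.length : Int) + 1) ≥ p.1 then r + 1 else r) r
      = r + cnt (xs.take k) rest := by
  induction rest generalizing k r with
  | nil => simp [cnt]
  | cons n rest' ih =>
    have hklen : k < xs.length := by
      by_contra hh
      have : xs.drop k = [] := List.drop_eq_nil_of_le (by omega)
      rw [this] at h; cases h
    have hrest' : rest' = xs.drop (k + 1) := by
      have h2 : xs.drop (k+1) = (xs.drop k).tail := by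
        rw [← List.drop_drop]; simp
      rw [h2, ← h]
      rfl
    have hn : xs[k]? = some n := by
      have h0 : (List.drop k xs)[0]? = xs[k + 0]? := List.getElem?_drop
      rw [← h] at h0
      simpa using h0.symm
    rw [PySem.List.enumerate_cons, List.foldl_cons]
    have hcond := cond_iff xs (n - 1) k hklen
    have htake : xs.take (k+1) = xs.take k ++ [n] := by
      rw [List.take_add_one]
      simp [hn]
    by_cases hmem : n - 1 ∈ xs.take k
    · rw [if_neg (fun hge => (hcond.mp hge) hmem)]
      have hrec := ih (k + 1) r hrest' (by omega)
      push_cast at hrec ⊢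
      rw [hrec, htake]
      rw [cnt, if_pos hmem]
      ring_nf
    · rw [if_pos (hcond.mpr hmem)]
      have hrec := ih (k + 1) (r + 1) hrest' (by omega)
      push_cast at hrec ⊢
      rw [hrec, htake]
      rw [cnt, if_neg hmem]
      ring_nf

-- ===== VERDICT (by name: the statement is the Claim_ definition above) =====
theorem solve_spec : Claim_equal_solve := by
  intro nums _
  unfold Spec_solve solve solve_alt
  rw [aSide nums [] PySem.Set.empty 0 (by intro x; simp [PySem.Set.empty])]
  have hb := bSide nums nums 0 0 (by simp) (by omega)
  simp only [Nat.cast_zero, List.take_zero] at hb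
  rw [hb]
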